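-- pv_equiv track=rewrite | github.com/Smileman1/AlgorithmProblem | TOSS_test2.py | solution
-- ===== SOURCE A (Python) =====
-- def solution(servers, sticky, requests):
--     answer = [[] for _ in range(servers)]
--     point = 0
--
--     if sticky:
--         for x in requests:
--             taget = True
--             for y in range(servers):
--                 if x in answer[y]:
--                     answer[y].append(x)
--                     taget = False
--             if taget:
--                 answer[point].append(x)
--                 point+=1
--                 point%=servers
--
--     else:
--         for x in requests:
--             answer[point].append(x)
--             point += 1
--             point %= servers
--
--
--     return answer
-- ===== SOURCE B (Python) =====
-- def solution(servers, sticky, requests):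
--     # phase 1: compute each request's server key
--     if sticky:
--         assign = {}
--         nxt = 0
--         for x in requests:
--             if x not in assign:
--                 assign[x] = nxt
--                 nxt = (nxt + 1) % servers
--         keys = [assign[x] for x in requests]
--     else:
--         keys = [i % servers for i in range(len(requests))]
--     # phase 2: distribute by precomputed key
--     answer = [[] for _ in range(servers)]
--     for k, x in zip(keys, requests):
--         answer[k].append(x)
--     return answer
-- ===== Notes on version B (the rewrite author's own statement) =====
-- stated objective: alternative
-- what changed: A interleaves routing and appending in one mutating loop (sticky: an inner membership scan over every server list per request; non-sticky: a rolling counter mutated mod servers); B separates the task into a first pass that computes each request's server key (a sticky routing dict keyed by value / index mod servers) and a second pass that distributes requests by the precomputed keys.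
import Mathlib
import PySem

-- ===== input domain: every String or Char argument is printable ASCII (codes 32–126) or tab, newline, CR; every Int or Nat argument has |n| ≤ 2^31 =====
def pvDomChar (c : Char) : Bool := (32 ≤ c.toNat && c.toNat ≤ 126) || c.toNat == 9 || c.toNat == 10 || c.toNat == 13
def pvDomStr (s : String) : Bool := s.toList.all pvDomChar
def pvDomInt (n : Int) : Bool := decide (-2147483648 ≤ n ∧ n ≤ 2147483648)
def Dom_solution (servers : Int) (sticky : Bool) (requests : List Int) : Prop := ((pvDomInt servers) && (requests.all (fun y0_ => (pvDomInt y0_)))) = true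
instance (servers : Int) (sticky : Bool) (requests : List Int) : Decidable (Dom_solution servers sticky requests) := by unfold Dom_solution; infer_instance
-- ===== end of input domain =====

-- B replaces A's single mutating scan-and-append loop by a routing-table pass plus per-server filters (objective: alternative decomposition).

-- ===== PORT A =====
-- inner `for y in range(servers)` body: `if x in answer[y]: answer[y].append(x); taget = False`
-- (the `answer[y]` read is ported as pyGetD, the in-place append as List.modify at y.toNat:
--  y comes from range(servers), so it is a valid non-negative index, exactly Python's behaviour)
def aInner (x : Int) (t : List (List Int) × Bool) (y : Int) : List (List Int) × Bool :=
  if x ∈ PySem.List.pyGetD t.1 y [] then (t.1.modify y.toNat (· ++ [x]), false) else t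

-- sticky `for x in requests` body; `answer[point].append(x)` is List.modify at point.toNat
-- (point stays in [0, servers) under Pre_solution, exactly Python's non-negative index)
def aStickyStep (servers : Int) (s : List (List Int) × Int) (x : Int) : List (List Int) × Int :=
  let inner := (PySem.List.pyRange 0 servers 1).foldl (aInner x) (s.1, true)
  if inner.2 then (inner.1.modify s.2.toNat (· ++ [x]), PySem.Int.mod (s.2 + 1) servers)
  else (inner.1, s.2)

-- non-sticky `for x in requests` body
def aRRStep (servers : Int) (s : List (List Int) × Int) (x : Int) : List (List Int) × Int :=
  (s.1.modify s.2.toNat (· ++ [x]), PySem.Int.mod (s.2 + 1) servers)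

def solution (servers : Int) (sticky : Bool) (requests : List Int) : List (List Int) :=
  let answer : List (List Int) := (PySem.List.pyRange 0 servers 1).map (fun _ => [])
  if sticky then (requests.foldl (aStickyStep servers) (answer, 0)).1
  else (requests.foldl (aRRStep servers) (answer, 0)).1

-- ===== PORT B =====
-- pass-1 body: `if x not in assign: assign[x] = nxt; nxt = (nxt + 1) % servers`
def bAssignStep (servers : Int) (s : PySem.Dict Int Int × Int) (x : Int) : PySem.Dict Int Int × Int :=
  if s.1.contains x then s else (s.1.insert x s.2, PySem.Int.mod (s.2 + 1) servers)

-- `assign[x]` in Source B never raises (pass 1 inserted every request value), so getD _ 0 is exact there;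
-- phase-2 `answer[k].append(x)` is List.modify at k.toNat (k is a valid non-negative index, as in Python)
def solution_alt (servers : Int) (sticky : Bool) (requests : List Int) : List (List Int) :=
  let keys : List Int :=
    if sticky then
      let assign := (requests.foldl (bAssignStep servers) (PySem.Dict.empty, 0)).1
      requests.map (fun x => assign.getD x 0)
    else
      (PySem.List.pyRange 0 (requests.length : Int) 1).map (fun i => PySem.Int.mod i servers)
  let answer : List (List Int) := (PySem.List.pyRange 0 servers 1).map (fun _ => [])
  (keys.zip requests).foldl (fun ans p => ans.modify p.1.toNat (· ++ [p.2])) answer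

-- ===== PRECONDITION & SPEC =====
-- A raises IndexError (answer[point] on an empty answer) when servers <= 0 and requests is non-empty; exactly those inputs are excluded.
def Pre_solution (servers : Int) (sticky : Bool) (requests : List Int) : Prop :=
  1 ≤ servers ∨ requests = []
instance (servers : Int) (sticky : Bool) (requests : List Int) : Decidable (Pre_solution servers sticky requests) := by unfold Pre_solution; infer_instance

def pvWitness_solution : Int × Bool × List Int := (2, true, [1, 2, 1, 3])

def Spec_solution (servers : Int) (sticky : Bool) (requests : List Int) (out : List (List Int)) : Prop := out = solution_alt servers sticky requests
instance (servers : Int) (sticky : Bool) (requests : List Int) (out : List (List Int)) : Decidable (Spec_solution servers sticky requests out) := by unfold Spec_solution; infer_instance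

-- ===== CLAIM (what is proved, stated in full; the proofs are below) =====
def Claim_equal_solution : Prop := ∀ (servers : Int) (sticky : Bool) (requests : List Int), Dom_solution servers sticky requests → Pre_solution servers sticky requests → Spec_solution servers sticky requests (solution servers sticky requests)

-- ===== LEMMAS AND PROOFS =====

-- `(map f range).modify j (· ++ [x])` is `map` of the pointwise-updated function
theorem modify_map_pyRange (n j : Int) (h0 : 0 ≤ j) (hj : j < n)
    (f : Int → List Int) (x : Int) :
    ((PySem.List.pyRange 0 n 1).map f).modify j.toNat (· ++ [x])
      = (PySem.List.pyRange 0 n 1).map (fun k => if k = j then f k ++ [x] else f k) := by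
  apply List.ext_getElem
  · simp [List.length_modify]
  · intro k h1 h2
    simp only [List.getElem_modify, List.getElem_map, PySem.List.getElem_pyRange_one]
    split_ifs with hA hB hB
    · rfl
    · exfalso; omega
    · exfalso; omega
    · rfl

theorem mod_succ_mod (n i : Int) (hn : 1 ≤ n) :
    PySem.Int.mod (PySem.Int.mod i n + 1) n = PySem.Int.mod (i + 1) n := by
  rw [PySem.Int.mod_eq_emod_of_pos (by omega), PySem.Int.mod_eq_emod_of_pos (by omega),
      PySem.Int.mod_eq_emod_of_pos (by omega)]
  conv_rhs => rw [Int.add_emod]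
  conv_lhs => rw [Int.add_emod]
  rw [Int.emod_emod_of_dvd _ (dvd_refl n)]

-- ---------- non-sticky: round-robin counter loop = filter by index mod servers ----------
theorem ns_loop (n : Int) (hn : 1 ≤ n) (xs : List Int) :
    ∀ (i : Int) (f : Int → List Int), 0 ≤ i →
    (xs.foldl (aRRStep n) ((PySem.List.pyRange 0 n 1).map f, PySem.Int.mod i n)).1
      = (PySem.List.pyRange 0 n 1).map (fun k =>
          f k ++ (PySem.List.enumerate xs i).filterMap
            (fun p => if PySem.Int.mod p.1 n == k then some p.2 else none)) := by
  induction xs with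
  | nil => intro i f hi; simp [PySem.List.enumerate]
  | cons x xs ih =>
    intro i f hi
    have hm0 : 0 ≤ PySem.Int.mod i n := PySem.Int.mod_nonneg (a := i) (by omega)
    have hm1 : PySem.Int.mod i n < n := PySem.Int.mod_lt (a := i) (by omega)
    rw [List.foldl_cons]
    show (xs.foldl (aRRStep n)
        (((PySem.List.pyRange 0 n 1).map f).modify (PySem.Int.mod i n).toNat (· ++ [x]),
          PySem.Int.mod (PySem.Int.mod i n + 1) n)).1 = _
    rw [modify_map_pyRange n _ hm0 hm1, mod_succ_mod n i hn, ih (i + 1) _ (by omega)]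
    rw [PySem.List.enumerate_cons]
    apply List.map_congr_left
    intro k _
    simp only [List.filterMap_cons]
    by_cases hk : k = PySem.Int.mod i n
    · subst hk
      simp [beq_iff_eq]
    · have : ¬ (PySem.Int.mod i n == k) = true := by simp [beq_iff_eq]; omega
      simp only [this, if_neg hk]
      simp [beq_iff_eq]

-- ---------- sticky ----------
-- the routing table's value at a key never changes once set
theorem bAssign_stable (n : Int) (xs : List Int) :
    ∀ (d : PySem.Dict Int Int) (p z v : Int), d.get? z = some v →
    ((xs.foldl (bAssignStep n) (d, p)).1).get? z = some v := by
  induction xs with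
  | nil => intro d p z v h; simpa using h
  | cons x xs ih =>
    intro d p z v h
    rw [List.foldl_cons]
    by_cases hc : d.contains x
    · rw [show bAssignStep n (d, p) x = (d, p) by simp [bAssignStep, hc]]
      exact ih d p z v h
    · rw [show bAssignStep n (d, p) x = (d.insert x p, PySem.Int.mod (p + 1) n) by
        simp [bAssignStep, hc]]
      apply ih
      rw [PySem.Dict.get?_insert]
      have hzx : z ≠ x := by
        intro hzx; subst hzx
        rw [PySem.Dict.contains_eq_isSome_get?, h] at hc; simp at hc
      rw [if_neg hzx]; exact h

-- A's inner scan over range(servers): no server list contains x → state unchanged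
theorem inner_no_hit (x : Int) (L : List Int) :
    ∀ (acc : List (List Int)) (flag : Bool),
    (∀ y ∈ L, x ∉ PySem.List.pyGetD acc y []) →
    L.foldl (aInner x) (acc, flag) = (acc, flag) := by
  induction L with
  | nil => intro acc flag _; rfl
  | cons y L ih =>
    intro acc flag h
    rw [List.foldl_cons, show aInner x (acc, flag) y = (acc, flag) by
      simp [aInner, h y (by simp)]]
    exact ih acc flag (fun y' hy' => h y' (by simp [hy']))

-- A's inner scan over range(servers), exactly one hit at y0: x is appended there, flag cleared
theorem inner_hit (n y0 x : Int) (h0 : 0 ≤ y0) (hy : y0 < n) (f : Int → List Int)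
    (hmem : ∀ y, 0 ≤ y → y < n → (x ∈ f y ↔ y = y0)) :
    (PySem.List.pyRange 0 n 1).foldl (aInner x) ((PySem.List.pyRange 0 n 1).map f, true)
      = ((PySem.List.pyRange 0 n 1).map fun k => if k = y0 then f k ++ [x] else f k, false) := by
  have hsplit : PySem.List.pyRange 0 n 1
      = PySem.List.pyRange 0 y0 1 ++ y0 :: PySem.List.pyRange (y0 + 1) n 1 := by
    rw [PySem.List.pyRange_one_append 0 y0 n h0 (by omega), PySem.List.pyRange_one_cons hy]
  set M := (PySem.List.pyRange 0 n 1).map f with hM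
  conv_lhs => rw [hsplit]
  rw [List.foldl_append]
  have h1 : (PySem.List.pyRange 0 y0 1).foldl (aInner x) (M, true) = (M, true) := by
    apply inner_no_hit
    intro y hy'
    rw [PySem.List.mem_pyRange_one] at hy'
    rw [hM, PySem.List.pyGetD_map_pyRange_of_nonneg f n y [] hy'.1 (by omega),
        hmem y hy'.1 (by omega)]
    omega
  rw [h1, List.foldl_cons]
  have h2 : aInner x (M, true) y0 = (M.modify y0.toNat (· ++ [x]), false) := by
    simp only [aInner]
    rw [if_pos]
    rw [hM, PySem.List.pyGetD_map_pyRange_of_nonneg f n y0 [] h0 hy, hmem y0 h0 hy]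
  rw [h2, hM, modify_map_pyRange n y0 h0 hy f x]
  apply inner_no_hit
  intro y hy'
  rw [PySem.List.mem_pyRange_one] at hy'
  rw [PySem.List.pyGetD_map_pyRange_of_nonneg _ n y [] (by omega) hy'.2]
  have hne : ¬ (y = y0) := by omega
  rw [if_neg hne, hmem y (by omega) hy'.2]
  exact hne

-- sticky main invariant: A's scan-and-append loop = per-server filters through B's routing table
theorem st_loop (n : Int) (hn : 1 ≤ n) (xs : List Int) :
    ∀ (d : PySem.Dict Int Int) (p : Int) (f : Int → List Int),
    0 ≤ p → p < n →
    (∀ z v, d.get? z = some v → 0 ≤ v ∧ v < n) →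
    (∀ y z, 0 ≤ y → y < n → (z ∈ f y ↔ d.get? z = some y)) →
    (xs.foldl (aStickyStep n) ((PySem.List.pyRange 0 n 1).map f, p)).1
      = (PySem.List.pyRange 0 n 1).map (fun k =>
          f k ++ xs.filter (fun z => ((xs.foldl (bAssignStep n) (d, p)).1).getD z 0 == k)) := by
  induction xs with
  | nil => intro d p f _ _ _ _; simp
  | cons x xs ih =>
    intro d p f hp0 hp1 hvals hmem
    rcases hcx : d.get? x with _ | y0
    · -- x not yet assigned: A appends at point p, B inserts x ↦ p
      have hcxf : d.contains x = false := by
        rw [PySem.Dict.contains_eq_isSome_get?, hcx]; rfl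
      have hinner : (PySem.List.pyRange 0 n 1).foldl (aInner x)
          ((PySem.List.pyRange 0 n 1).map f, true) = ((PySem.List.pyRange 0 n 1).map f, true) := by
        apply inner_no_hit
        intro y hy
        rw [PySem.List.mem_pyRange_one] at hy
        rw [PySem.List.pyGetD_map_pyRange_of_nonneg f n y [] hy.1 hy.2,
            hmem y x hy.1 hy.2, hcx]
        simp
      have hstepA : aStickyStep n ((PySem.List.pyRange 0 n 1).map f, p) x
          = ((PySem.List.pyRange 0 n 1).map (fun k => if k = p then f k ++ [x] else f k),
             PySem.Int.mod (p + 1) n) := by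
        unfold aStickyStep
        rw [hinner]
        simp only [if_pos trivial]
        rw [modify_map_pyRange n p hp0 hp1 f x]
      have hstepB : bAssignStep n (d, p) x = (d.insert x p, PySem.Int.mod (p + 1) n) := by
        simp [bAssignStep, hcxf]
      have hvals' : ∀ z v, (d.insert x p).get? z = some v → 0 ≤ v ∧ v < n := by
        intro z v hz
        rw [PySem.Dict.get?_insert] at hz
        by_cases hzx : z = x
        · rw [if_pos hzx] at hz
          cases hz; exact ⟨hp0, hp1⟩
        · rw [if_neg hzx] at hz
          exact hvals z v hz
      have hmem' : ∀ y z, 0 ≤ y → y < n →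
          (z ∈ (fun k => if k = p then f k ++ [x] else f k) y ↔ (d.insert x p).get? z = some y) := by
        intro y z hy0 hy1
        simp only
        rw [PySem.Dict.get?_insert]
        by_cases hzx : z = x
        · subst hzx
          rw [if_pos rfl]
          by_cases hyp : y = p
          · subst hyp; simp
          · simp only [if_neg hyp]
            rw [hmem y z hy0 hy1, hcx]
            simp
            omega
        · rw [if_neg hzx]
          by_cases hyp : y = p
          · simp only [if_pos hyp, List.mem_append, List.mem_singleton, hzx, or_false]
            rw [hmem y z hy0 hy1]
          · simp only [if_neg hyp]
            exact hmem y z hy0 hy1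
      rw [List.foldl_cons, hstepA, List.foldl_cons, hstepB,
          ih (d.insert x p) (PySem.Int.mod (p + 1) n) (fun k => if k = p then f k ++ [x] else f k)
             (PySem.Int.mod_nonneg (a := p + 1) (by omega))
             (PySem.Int.mod_lt (a := p + 1) (by omega)) hvals' hmem']
      have hfinx : ((xs.foldl (bAssignStep n) (d.insert x p, PySem.Int.mod (p + 1) n)).1).getD x 0 = p :=
        PySem.Dict.getD_of_get?_eq_some _ 0
          (bAssign_stable n xs _ _ x p (PySem.Dict.get?_insert_self d x p))
      apply List.map_congr_left
      intro k hk
      rw [List.filter_cons]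
      simp only [hfinx]
      by_cases hkp : k = p
      · subst hkp
        simp
      · have h1 : ¬ ((p : Int) == k) = true := by
          simp only [beq_iff_eq]
          exact fun h => hkp h.symm
        simp [h1, hkp]
    · -- x already assigned to server y0: A's inner scan appends at y0, table unchanged
      obtain ⟨hy00, hy01⟩ := hvals x y0 hcx
      have hinner := inner_hit n y0 x hy00 hy01 f (by
        intro y h1 h2
        rw [hmem y x h1 h2, hcx]
        constructor
        · intro h; injection h with h; omega
        · intro h; subst h; rfl)
      have hstepA : aStickyStep n ((PySem.List.pyRange 0 n 1).map f, p) x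
          = ((PySem.List.pyRange 0 n 1).map (fun k => if k = y0 then f k ++ [x] else f k), p) := by
        unfold aStickyStep
        rw [hinner]
        rfl
      have hstepB : bAssignStep n (d, p) x = (d, p) := by
        simp [bAssignStep, PySem.Dict.contains_eq_isSome_get?, hcx]
      have hmem' : ∀ y z, 0 ≤ y → y < n →
          (z ∈ (fun k => if k = y0 then f k ++ [x] else f k) y ↔ d.get? z = some y) := by
        intro y z hy0 hy1
        simp only
        by_cases hyy : y = y0
        · simp only [if_pos hyy, List.mem_append, List.mem_singleton]
          rw [hmem y z hy0 hy1]
          constructor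
          · rintro (h | h)
            · exact h
            · subst h; rw [hcx, hyy]
          · intro h; left; exact h
        · simp only [if_neg hyy]
          exact hmem y z hy0 hy1
      rw [List.foldl_cons, hstepA, List.foldl_cons, hstepB,
          ih d p (fun k => if k = y0 then f k ++ [x] else f k) hp0 hp1 hvals hmem']
      have hfinx : ((xs.foldl (bAssignStep n) (d, p)).1).getD x 0 = y0 :=
        PySem.Dict.getD_of_get?_eq_some _ 0 (bAssign_stable n xs d p x y0 hcx)
      apply List.map_congr_left
      intro k hk
      rw [List.filter_cons]
      simp only [hfinx]
      by_cases hky : k = y0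
      · subst hky
        simp
      · have h1 : ¬ ((y0 : Int) == k) = true := by
          simp only [beq_iff_eq]
          exact fun h => hky h.symm
        simp [h1, hky]

-- ---------- bridging B's distribution pass to the filter characterisations ----------
theorem dist_loop (n : Int) (ps : List (Int × Int)) :
    ∀ (f : Int → List Int),
    (∀ p ∈ ps, 0 ≤ p.1 ∧ p.1 < n) →
    ps.foldl (fun ans p => ans.modify p.1.toNat (· ++ [p.2])) ((PySem.List.pyRange 0 n 1).map f)
      = (PySem.List.pyRange 0 n 1).map (fun k => f k ++ (ps.filter (fun p => p.1 == k)).map (·.2)) := by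
  induction ps with
  | nil => intro f _; simp
  | cons p ps ih =>
    intro f h
    obtain ⟨hp0, hp1⟩ := h p (by simp)
    rw [List.foldl_cons, modify_map_pyRange n p.1 hp0 hp1 f p.2,
        ih _ (fun q hq => h q (by simp [hq]))]
    apply List.map_congr_left
    intro k _
    rw [List.filter_cons]
    by_cases hk : k = p.1
    · subst hk; simp
    · have h1 : ¬ (p.1 == k) = true := by
        simp only [beq_iff_eq]
        exact fun hh => hk hh.symm
      simp [h1, hk]

theorem filterMap_ite {α β : Type} (l : List (α × β)) (q : α × β → Bool) :
    l.filterMap (fun p => if q p then some p.2 else none) = (l.filter q).map (·.2) := by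
  induction l with
  | nil => rfl
  | cons p l ih =>
    rw [List.filterMap_cons, List.filter_cons]
    by_cases hq : q p
    · simp [hq, ih]
    · simp [hq, ih]

theorem zip_map_pyRange (g : Int → Int) (xs : List Int) :
    ∀ (a : Int),
    ((PySem.List.pyRange a (a + xs.length) 1).map g).zip xs
      = (PySem.List.enumerate xs a).map (fun p => (g p.1, p.2)) := by
  induction xs with
  | nil => intro a; simp [PySem.List.pyRange_one_eq_nil (le_refl a)]
  | cons x xs ih =>
    intro a
    have hlt : a < a + ((x :: xs).length : Int) := by simp
    rw [PySem.List.pyRange_one_cons hlt, List.map_cons, List.zip_cons_cons,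
        PySem.List.enumerate_cons, List.map_cons]
    have hn : a + ((x :: xs).length : Int) = (a + 1) + (xs.length : Int) := by
      push_cast [List.length_cons]; ring
    rw [hn, ih (a + 1)]

theorem zip_map_self {α β : Type} (h : α → β) (l : List α) :
    (l.map h).zip l = l.map (fun x => (h x, x)) := by
  induction l with
  | nil => rfl
  | cons x l ih => simp [ih]

-- every request value ends up in B's routing table, with an in-range server index
theorem bAssign_covers (n : Int) (xs : List Int) :
    ∀ (d : PySem.Dict Int Int) (p : Int), 0 ≤ p → p < n →
    (∀ z v, d.get? z = some v → 0 ≤ v ∧ v < n) →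
    ∀ x ∈ xs, ∃ v, ((xs.foldl (bAssignStep n) (d, p)).1).get? x = some v ∧ 0 ≤ v ∧ v < n := by
  induction xs with
  | nil => intro d p _ _ _ x hx; cases hx
  | cons y xs ih =>
    intro d p hp0 hp1 hvals x hx
    rw [List.foldl_cons]
    by_cases hc : d.contains y
    · obtain ⟨v, hv⟩ : ∃ v, d.get? y = some v := by
        rw [PySem.Dict.contains_eq_isSome_get?] at hc
        exact Option.isSome_iff_exists.mp hc
      rw [show bAssignStep n (d, p) y = (d, p) by simp [bAssignStep, hc]]
      rcases List.mem_cons.mp hx with hxy | hx'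
      · subst hxy
        exact ⟨v, bAssign_stable n xs d p x v hv, hvals x v hv⟩
      · exact ih d p hp0 hp1 hvals x hx'
    · rw [show bAssignStep n (d, p) y = (d.insert y p, PySem.Int.mod (p + 1) n) by
        simp [bAssignStep, hc]]
      have hvals' : ∀ z v, (d.insert y p).get? z = some v → 0 ≤ v ∧ v < n := by
        intro z v hz
        rw [PySem.Dict.get?_insert] at hz
        by_cases hzy : z = y
        · rw [if_pos hzy] at hz; cases hz; exact ⟨hp0, hp1⟩
        · rw [if_neg hzy] at hz; exact hvals z v hz
      rcases List.mem_cons.mp hx with hxy | hx'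
      · subst hxy
        exact ⟨p, bAssign_stable n xs _ _ x p (PySem.Dict.get?_insert_self d x p), hp0, hp1⟩
      · exact ih (d.insert y p) (PySem.Int.mod (p + 1) n)
          (PySem.Int.mod_nonneg (a := p + 1) (by
            have := hp1; omega))
          (PySem.Int.mod_lt (a := p + 1) (by
            have := hp0; omega)) hvals' x hx'

-- ===== VERDICT (by name: the statement is the Claim_ definition above) =====
theorem solution_spec : Claim_equal_solution := by
  intro servers sticky requests _ hpre
  unfold Spec_solution
  by_cases hreq : requests = []
  · subst hreq
    cases sticky <;> simp [solution, solution_alt]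
  · have hn : 1 ≤ servers := by
      rcases hpre with h | h
      · exact h
      · exact absurd h hreq
    have hz : PySem.Int.mod 0 servers = 0 := by
      rw [PySem.Int.mod_eq_emod_of_pos (by omega)]; simp
    cases sticky
    · -- non-sticky: A's counter loop and B's keyed distribution both equal filter-by-index-mod
      have h := ns_loop servers hn requests 0 (fun _ => []) le_rfl
      rw [hz] at h
      unfold solution solution_alt
      simp only [Bool.false_eq_true, if_false]
      rw [h]
      have hzr := zip_map_pyRange (fun i => PySem.Int.mod i servers) requests 0
      rw [zero_add] at hzr
      rw [hzr, dist_loop servers _ (fun _ => []) (by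
        intro p hp
        rw [List.mem_map] at hp
        obtain ⟨q, _, rfl⟩ := hp
        exact ⟨PySem.Int.mod_nonneg (a := q.1) (by omega),
               PySem.Int.mod_lt (a := q.1) (by omega)⟩)]
      apply List.map_congr_left
      intro k _
      simp only [List.nil_append]
      rw [List.filter_map, List.map_map]
      rw [filterMap_ite (PySem.List.enumerate requests 0) (fun p => PySem.Int.mod p.1 servers == k)]
      rfl
    · -- sticky: A's scan-and-append loop and B's table-then-distribute both equal per-server filters
      unfold solution solution_alt
      simp only [if_pos trivial]
      rw [st_loop servers hn requests PySem.Dict.empty 0 (fun _ => []) le_rfl (by omega)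
            (by intro z v h; rw [PySem.Dict.get?_empty] at h; cases h)
            (by intro y z hy0 hy1; rw [PySem.Dict.get?_empty]; simp)]
      have hcov := bAssign_covers servers requests PySem.Dict.empty 0 le_rfl (by omega)
        (by intro z v h; rw [PySem.Dict.get?_empty] at h; cases h)
      rw [zip_map_self, dist_loop servers _ (fun _ => []) (by
        intro p hp
        rw [List.mem_map] at hp
        obtain ⟨x, hx, rfl⟩ := hp
        obtain ⟨v, hv, hv0, hv1⟩ := hcov x hx
        rw [PySem.Dict.getD_of_get?_eq_some _ 0 hv]
        exact ⟨hv0, hv1⟩)]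
      apply List.map_congr_left
      intro k _
      simp only [List.nil_append]
      rw [List.filter_map, List.map_map]
      simp [Function.comp_def]
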